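-- pv_equiv track=rewrite | github.com/raibullich/Conscious-Unconscious-information-processing-iEEG | preprocessing_functions.py | create_probe_channels_list_of_lists
-- ===== SOURCE A (Python) =====
-- def create_probe_channels_list_of_lists(list_channels):
--
--     ''' Creates a lists of lists. Each sub-list belongs to one probe, so all channels in that list will share the same letter (and ' sign).
--         Input a list of all channel names (e.g., A2, A4, A6, B2, B5...)
--         Returns a list of lists.'''
--
--     # Initialize dictionaries to store the classified elements
--     classified_elements = {}
--
--     # Iterate through the list and classify the elements
--     for item in list_channels:
--         letter = item[0]  # Get the first character (letter)
--         if "'" in item:  # Check if the item has a prime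
--             classified_elements.setdefault((letter, True), []).append(item) # True means has a prime
--         else:
--             classified_elements.setdefault((letter, False), []).append(item)
--     # Convert dictionaries to lists
--     result_lists = list(classified_elements.values())
--     return result_lists
-- ===== SOURCE B (Python) =====
-- def create_probe_channels_list_of_lists(list_channels):
--     # Two-phase grouping: collect distinct (first_letter, has_prime) keys in
--     # order of first appearance, then filter the original list per key.
--     seen = []
--     for item in list_channels:
--         k = (item[0], "'" in item)
--         if k not in seen:
--             seen.append(k)
--     return [[it for it in list_channels if (it[0], "'" in it) == k] for k in seen]
-- ===== Notes on version B (the rewrite author's own statement) =====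
-- stated objective: alternative
-- what changed: A accumulates groups in one pass with dict.setdefault(...).append; B first collects the distinct (first_letter, has_prime) keys in order of first appearance and then builds each group by filtering the original list per key.
-- outside the precondition, e.g. on create_probe_channels_list_of_lists(['A1', '']): A raises IndexError, B raises IndexError
import Mathlib
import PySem

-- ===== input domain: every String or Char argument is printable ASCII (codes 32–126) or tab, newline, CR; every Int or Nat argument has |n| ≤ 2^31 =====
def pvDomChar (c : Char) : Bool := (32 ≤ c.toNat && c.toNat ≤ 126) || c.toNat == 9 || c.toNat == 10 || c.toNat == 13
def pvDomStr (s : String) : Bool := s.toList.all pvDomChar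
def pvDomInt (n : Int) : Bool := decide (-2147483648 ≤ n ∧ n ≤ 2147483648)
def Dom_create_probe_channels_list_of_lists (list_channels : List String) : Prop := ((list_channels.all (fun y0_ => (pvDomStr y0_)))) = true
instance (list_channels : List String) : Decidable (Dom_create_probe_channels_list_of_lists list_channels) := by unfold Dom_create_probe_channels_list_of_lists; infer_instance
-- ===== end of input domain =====

-- B replaces A's one-pass dict.setdefault accumulation by a two-phase "collect distinct keys, then filter per key" decomposition (objective: alternative; not faster).


-- ===== PORT A =====
-- item[0]: PySem.Str.pyGet? is none exactly where Python raises IndexError (item = "");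
-- that case is excluded by Pre_, so the .getD ' ' default is never taken on admitted inputs.
def create_probe_channels_list_of_lists (list_channels : List String) : List (List String) :=
  let classified_elements : PySem.Dict (Char × Bool) (List String) :=
    list_channels.foldl (fun d item =>
      let letter : Char := (PySem.Str.pyGet? item 0).getD ' '
      if PySem.Str.isIn "'" item then
        d.modify (letter, true) [] (fun xs => xs ++ [item])
      else
        d.modify (letter, false) [] (fun xs => xs ++ [item]))
      PySem.Dict.empty
  classified_elements.values

-- ===== PORT B =====
def create_probe_channels_list_of_lists_alt (list_channels : List String) : List (List String) :=
  let seen : List (Char × Bool) :=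
    list_channels.foldl (fun ks item =>
      let k := ((PySem.Str.pyGet? item 0).getD ' ', PySem.Str.isIn "'" item)
      if ks.contains k then ks else ks ++ [k]) []
  seen.map (fun k =>
    list_channels.filter (fun it => ((PySem.Str.pyGet? it 0).getD ' ', PySem.Str.isIn "'" it) == k))

-- ===== PRECONDITION & SPEC =====
-- Pre_ excludes lists containing the empty string, on which Python A raises IndexError at item[0] (B raises there too).
def Pre_create_probe_channels_list_of_lists (list_channels : List String) : Prop := "" ∉ list_channels
instance (list_channels : List String) : Decidable (Pre_create_probe_channels_list_of_lists list_channels) := by unfold Pre_create_probe_channels_list_of_lists; infer_instance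
def pvWitness_create_probe_channels_list_of_lists : List String := ["A2", "A'1", "B3", "A4"]
def Spec_create_probe_channels_list_of_lists (list_channels : List String) (out : List (List String)) : Prop := out = create_probe_channels_list_of_lists_alt list_channels
instance (list_channels : List String) (out : List (List String)) : Decidable (Spec_create_probe_channels_list_of_lists list_channels out) := by unfold Spec_create_probe_channels_list_of_lists; infer_instance

-- ===== CLAIM (what is proved, stated in full; the proofs are below) =====
def Claim_equal_create_probe_channels_list_of_lists : Prop := ∀ (list_channels : List String), Dom_create_probe_channels_list_of_lists list_channels → Pre_create_probe_channels_list_of_lists list_channels → Spec_create_probe_channels_list_of_lists list_channels (create_probe_channels_list_of_lists list_channels)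

-- ===== LEMMAS AND PROOFS =====

-- the key both programs classify by
def pvKey (s : String) : Char × Bool := ((PySem.Str.pyGet? s 0).getD ' ', PySem.Str.isIn "'" s)

-- A's loop body is one modify at pvKey item
theorem pvStepA_eq (d : PySem.Dict (Char × Bool) (List String)) (item : String) :
    (let letter : Char := (PySem.Str.pyGet? item 0).getD ' '
     if PySem.Str.isIn "'" item then
       d.modify (letter, true) [] (fun xs => xs ++ [item])
     else
       d.modify (letter, false) [] (fun xs => xs ++ [item]))
    = d.modify (pvKey item) [] (fun xs => xs ++ [item]) := by
  cases h : PySem.Str.isIn "'" item <;> simp only [pvKey, h] <;> simp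

-- the group of key c in A's dict is the per-key filter of the input list
theorem pvGetD_dictA (l : List String) (c : Char × Bool) :
    ((l.foldl (fun d item => d.modify (pvKey item) [] (fun xs => xs ++ [item]))
        (PySem.Dict.empty : PySem.Dict (Char × Bool) (List String))).getD c [])
    = l.filter (fun it => pvKey it == c) := by
  have h : l.foldl (fun d item => d.modify (pvKey item) [] (fun xs => xs ++ [item]))
        (PySem.Dict.empty : PySem.Dict (Char × Bool) (List String))
      = (l.map (fun it => (pvKey it, it))).foldl
          (fun d p => d.modify p.1 [] (fun xs => xs ++ [p.2])) PySem.Dict.empty := by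
    rw [List.foldl_map]
  rw [h, PySem.Dict.getD_foldl_modify_append]
  simp [List.filter_map, Function.comp_def]

theorem create_probe_channels_list_of_lists_eq_alt (l : List String) :
    create_probe_channels_list_of_lists l = create_probe_channels_list_of_lists_alt l := by
  show (l.foldl (fun (d : PySem.Dict (Char × Bool) (List String)) item =>
      let letter : Char := (PySem.Str.pyGet? item 0).getD ' '
      if PySem.Str.isIn "'" item then
        d.modify (letter, true) [] (fun xs => xs ++ [item])
      else
        d.modify (letter, false) [] (fun xs => xs ++ [item])) PySem.Dict.empty).values
    = (l.foldl (fun ks item => PySem.Set.add ks (pvKey item)) []).map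
        (fun k => l.filter (fun it => pvKey it == k))
  have hstep : (fun (d : PySem.Dict (Char × Bool) (List String)) item =>
      let letter : Char := (PySem.Str.pyGet? item 0).getD ' '
      if PySem.Str.isIn "'" item then
        d.modify (letter, true) [] (fun xs => xs ++ [item])
      else
        d.modify (letter, false) [] (fun xs => xs ++ [item]))
      = fun d item => d.modify (pvKey item) [] (fun xs => xs ++ [item]) :=
    funext fun d => funext fun item => pvStepA_eq d item
  rw [hstep]
  have hnodup : (l.foldl (fun d item => d.modify (pvKey item) [] (fun xs => xs ++ [item]))
      (PySem.Dict.empty : PySem.Dict (Char × Bool) (List String))).keys.Nodup :=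
    PySem.Dict.nodup_keys_foldl_modify_key l pvKey [] (fun _ item xs => xs ++ [item]) _
      PySem.Dict.nodup_keys_empty
  have hkeys : (l.foldl (fun d item => d.modify (pvKey item) [] (fun xs => xs ++ [item]))
      (PySem.Dict.empty : PySem.Dict (Char × Bool) (List String))).keys
      = l.foldl (fun ks item => PySem.Set.add ks (pvKey item)) [] := by
    rw [PySem.Dict.keys_foldl_modify_key l pvKey [] (fun _ item xs => xs ++ [item])]
    simp only [PySem.Set.update, PySem.Dict.keys_empty, List.foldl_map]
  rw [PySem.Dict.values_eq_map_keys _ hnodup [], hkeys]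
  exact List.map_congr_left fun k _ => pvGetD_dictA l k

-- ===== VERDICT (by name: the statement is the Claim_ definition above) =====
theorem create_probe_channels_list_of_lists_spec : Claim_equal_create_probe_channels_list_of_lists := by
  intro l _ _
  unfold Spec_create_probe_channels_list_of_lists
  exact create_probe_channels_list_of_lists_eq_alt l
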